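-- pv_equiv track=rewrite | github.com/chenfengxu714/StreamDiffusionV2 | streamv2v/inference_pipe.py | compute_default_block_distribution
-- ===== SOURCE A (Python) =====
-- def compute_default_block_distribution(total_blocks: int, world_size: int) -> list[list[int]]:
--     """Split transformer blocks into contiguous ranges for each rank."""
--     if world_size == 2:
--         midpoint = total_blocks // 2
--         return [[0, midpoint], [midpoint, total_blocks]]
--
--     base = total_blocks // world_size
--     rem = total_blocks % world_size
--     start = 0
--     block_ranges = []
--     for rank in range(world_size):
--         size = base + (1 if rank < rem else 0)
--         end = start + size if rank < world_size - 1 else total_blocks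
--         block_ranges.append([start, end])
--         start = end
--     return block_ranges
-- ===== SOURCE B (Python) =====
-- def compute_default_block_distribution(total_blocks: int, world_size: int) -> list[list[int]]:
--     """Split transformer blocks into contiguous ranges for each rank."""
--     if world_size == 2:
--         midpoint = total_blocks // 2
--         return [[0, midpoint], [midpoint, total_blocks]]
--
--     base = total_blocks // world_size
--     rem = total_blocks % world_size
--     return [[r * base + min(r, rem), (r + 1) * base + min(r + 1, rem)]
--             for r in range(world_size)]
-- ===== Notes on version B (the rewrite author's own statement) =====
-- stated objective: alternative
-- what changed: The general case is rebuilt as a single list comprehension computing each rank's range from a closed form (lo = r*base + min(r, rem)), eliminating the running start accumulator and the explicit last-rank override.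
import Mathlib
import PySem

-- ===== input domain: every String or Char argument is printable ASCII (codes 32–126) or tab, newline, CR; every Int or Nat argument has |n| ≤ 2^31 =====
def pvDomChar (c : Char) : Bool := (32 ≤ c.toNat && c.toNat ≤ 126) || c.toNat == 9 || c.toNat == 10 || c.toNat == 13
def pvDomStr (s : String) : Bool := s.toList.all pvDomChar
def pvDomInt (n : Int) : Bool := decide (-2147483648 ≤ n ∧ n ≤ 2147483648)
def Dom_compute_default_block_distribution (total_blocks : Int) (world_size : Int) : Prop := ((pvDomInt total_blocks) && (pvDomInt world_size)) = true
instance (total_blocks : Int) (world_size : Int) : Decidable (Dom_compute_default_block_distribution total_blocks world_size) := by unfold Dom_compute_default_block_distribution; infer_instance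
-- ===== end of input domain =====

-- B replaces the running-start loop of the general case by a per-rank closed form
-- (lo = r*base + min r rem); same cost, different decomposition. Same return value on Pre_.

-- ===== PORT A =====
def compute_default_block_distribution (total_blocks : Int) (world_size : Int) : List (List Int) :=
  if world_size = 2 then
    let midpoint := PySem.Int.floordiv total_blocks 2
    [[0, midpoint], [midpoint, total_blocks]]
  else
    let base := PySem.Int.floordiv total_blocks world_size
    let rem := PySem.Int.mod total_blocks world_size
    -- start = 0; block_ranges = []; for rank in range(world_size): …
    let res := (PySem.List.pyRange 0 world_size 1).foldl
      (fun (st : Int × List (List Int)) rank =>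
        let start := st.1
        let size := base + (if rank < rem then (1 : Int) else 0)
        let end_ := if rank < world_size - 1 then start + size else total_blocks
        (end_, st.2 ++ [[start, end_]]))
      (0, [])
    res.2

-- ===== PORT B =====
def compute_default_block_distribution_alt (total_blocks : Int) (world_size : Int) : List (List Int) :=
  if world_size = 2 then
    let midpoint := PySem.Int.floordiv total_blocks 2
    [[0, midpoint], [midpoint, total_blocks]]
  else
    let base := PySem.Int.floordiv total_blocks world_size
    let rem := PySem.Int.mod total_blocks world_size
    (PySem.List.pyRange 0 world_size 1).map
      (fun r => [r * base + min r rem, (r + 1) * base + min (r + 1) rem])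

-- ===== PRECONDITION & SPEC =====
-- world_size = 0 makes the Python '//' raise ZeroDivisionError (in A and in B alike).
def Pre_compute_default_block_distribution (total_blocks : Int) (world_size : Int) : Prop :=
  world_size ≠ 0
instance (total_blocks : Int) (world_size : Int) : Decidable (Pre_compute_default_block_distribution total_blocks world_size) := by unfold Pre_compute_default_block_distribution; infer_instance

def pvWitness_compute_default_block_distribution : Int × Int := (8, 3)

def Spec_compute_default_block_distribution (total_blocks : Int) (world_size : Int) (out : List (List Int)) : Prop := out = compute_default_block_distribution_alt total_blocks world_size
instance (total_blocks : Int) (world_size : Int) (out : List (List Int)) : Decidable (Spec_compute_default_block_distribution total_blocks world_size out) := by unfold Spec_compute_default_block_distribution; infer_instance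

-- ===== CLAIM (what is proved, stated in full; the proofs are below) =====
def Claim_equal_compute_default_block_distribution : Prop := ∀ (total_blocks : Int) (world_size : Int), Dom_compute_default_block_distribution total_blocks world_size → Pre_compute_default_block_distribution total_blocks world_size → Spec_compute_default_block_distribution total_blocks world_size (compute_default_block_distribution total_blocks world_size)

-- ===== LEMMAS AND PROOFS =====

-- Invariant of A's loop over ranks 0..n-1 when no rank hits the last-rank override:
-- the running start equals the closed form n*base + min n rem, and the accumulated
-- ranges equal B's per-rank closed forms.
lemma foldA_inv (t w base rem : Int) (hrem0 : 0 ≤ rem) (n : Nat)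
    (hn : (n : Int) ≤ w - 1) :
    (PySem.List.pyRange 0 (n : Int) 1).foldl
      (fun (st : Int × List (List Int)) rank =>
        let start := st.1
        let size := base + (if rank < rem then (1 : Int) else 0)
        let end_ := if rank < w - 1 then start + size else t
        (end_, st.2 ++ [[start, end_]]))
      (0, [])
    = ((n : Int) * base + min (n : Int) rem,
       (PySem.List.pyRange 0 (n : Int) 1).map
         (fun r => [r * base + min r rem, (r + 1) * base + min (r + 1) rem])) := by
  induction n with
  | zero => simp [PySem.List.pyRange_one_eq_nil]; omega
  | succ k ih =>
    have hk : (k : Int) ≤ w - 1 := by push_cast at hn ⊢; omega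
    have hsplit : PySem.List.pyRange 0 ((k : Int) + 1) 1
        = PySem.List.pyRange 0 (k : Int) 1 ++ [(k : Int)] := by
      exact PySem.List.pyRange_one_succ_right (by positivity)
    have hklt : (k : Int) < w - 1 := by push_cast at hn; omega
    push_cast
    rw [hsplit, List.foldl_append, ih hk, List.map_append]
    simp only [List.foldl_cons, List.foldl_nil, List.map_cons, List.map_nil, hklt, if_pos]
    have hm : min ((k : Int) + 1) rem
        = min (k : Int) rem + (if (k : Int) < rem then (1 : Int) else 0) := by
      split_ifs with h <;> omega
    have hend : (k : Int) * base + min (k : Int) rem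
          + (base + (if (k : Int) < rem then (1 : Int) else 0))
        = ((k : Int) + 1) * base + min ((k : Int) + 1) rem := by
      rw [hm]; ring
    rw [Prod.mk.injEq]
    exact ⟨hend, by rw [hend]⟩

theorem compute_default_block_distribution_spec : Claim_equal_compute_default_block_distribution := by
  intro t w _ hw
  unfold Spec_compute_default_block_distribution
  unfold compute_default_block_distribution compute_default_block_distribution_alt
  by_cases h2 : w = 2
  · simp [h2]
  · simp only [h2, if_false]
    by_cases hwpos : 0 < w
    · set base := PySem.Int.floordiv t w with hbase
      set rem := PySem.Int.mod t w with hrem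
      have hrem0 : 0 ≤ rem := PySem.Int.mod_nonneg t hwpos
      have hremlt : rem < w := PySem.Int.mod_lt t hwpos
      have hid : base * w + rem = t := PySem.Int.floordiv_mul_add_mod t w
      have hn : ((w - 1).toNat : Int) = w - 1 := by omega
      have hsplit : PySem.List.pyRange 0 w 1
          = PySem.List.pyRange 0 (w - 1) 1 ++ [w - 1] := by
        have := PySem.List.pyRange_one_succ_right (a := 0) (b := w - 1) (by omega)
        simpa using this
      rw [hsplit, List.foldl_append, List.map_append]
      have hinv := foldA_inv t w base rem hrem0 (w - 1).toNat (by omega)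
      rw [hn] at hinv
      rw [hinv]
      simp only [List.foldl_cons, List.foldl_nil, List.map_cons, List.map_nil,
        lt_irrefl, if_false]
      have hmin : min (w - 1 + 1) rem = rem := by omega
      have hmul : (w - 1 + 1) * base = base * w := by ring
      have hlast : (w - 1 + 1) * base + min (w - 1 + 1) rem = t := by
        rw [hmin, hmul]; linarith [hid]
      rw [hlast]
    · -- w < 0 (w ≠ 0): range(world_size) is empty in both programs
      have : PySem.List.pyRange 0 w 1 = [] :=
        PySem.List.pyRange_one_eq_nil (by omega)
      simp [this]
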